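-- pv_equiv track=rewrite | github.com/ludariumgames/Grid | src/pattern_engine.py | _rank_stripes_rows
-- ===== SOURCE A (Python) =====
-- from typing import Dict, Iterable, List, Optional, Sequence, Set, Tuple
--
-- def _rank_stripes_rows(grid: List[List[Optional[int]]], domain: Set[int]) -> bool:
--     # grid[y][x]
--     for start in domain:
--         for direction in (1, -1):
--             row_vals = [start + direction * i for i in range(3)]
--             if any(v not in domain for v in row_vals):
--                 continue
--
--             ok = True
--             for y in range(3):
--                 expected = row_vals[y]
--                 for x in range(3):
--                     fixed = grid[y][x]
--                     if fixed is not None and fixed != expected: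
--                         ok = False
--                         break
--                 if not ok:
--                     break
--             if ok:
--                 return True
--     return False
-- ===== SOURCE B (Python) =====
-- from typing import List, Optional, Set
--
-- def _rank_stripes_rows(grid: List[List[Optional[int]]], domain: Set[int]) -> bool:
--     # Constraint-driven: read off the unique fixed value per row (conflict => False),
--     # then for each direction solve for the start and verify, instead of scanning the domain.
--     fixed = []  # (row_index, its unique fixed value) for rows with a fixed cell
--     for y, row in enumerate(grid[:3]):
--         f = None
--         for c in row[:3]:
--             if c is None:
--                 continue
--             if f is not None and c != f:
--                 return False  # two different fixed values in one row
--             f = c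
--         if f is not None:
--             fixed.append((y, f))
--     if not fixed:
--         # unconstrained grid: any 3-term progression inside the domain works
--         return any(all(v + d * i in domain for i in range(3))
--                    for v in domain for d in (1, -1))
--     for d in (1, -1):
--         y0, v0 = fixed[0]
--         s = v0 - d * y0
--         if all(v == s + d * y for y, v in fixed) and \
--            all(s + d * i in domain for i in range(3)):
--             return True
--     return False
-- ===== Notes on version B (the rewrite author's own statement) =====
-- stated objective: faster
-- what changed: B reads the unique fixed value of each row off the grid and solves for the progression start per direction (falling back to a domain scan only when the grid has no fixed cell), instead of A's brute-force scan over every domain value.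
-- outside the precondition, e.g. on _rank_stripes_rows([[5]], {1, 2, 3}): A returns False, B returns False
import Mathlib
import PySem

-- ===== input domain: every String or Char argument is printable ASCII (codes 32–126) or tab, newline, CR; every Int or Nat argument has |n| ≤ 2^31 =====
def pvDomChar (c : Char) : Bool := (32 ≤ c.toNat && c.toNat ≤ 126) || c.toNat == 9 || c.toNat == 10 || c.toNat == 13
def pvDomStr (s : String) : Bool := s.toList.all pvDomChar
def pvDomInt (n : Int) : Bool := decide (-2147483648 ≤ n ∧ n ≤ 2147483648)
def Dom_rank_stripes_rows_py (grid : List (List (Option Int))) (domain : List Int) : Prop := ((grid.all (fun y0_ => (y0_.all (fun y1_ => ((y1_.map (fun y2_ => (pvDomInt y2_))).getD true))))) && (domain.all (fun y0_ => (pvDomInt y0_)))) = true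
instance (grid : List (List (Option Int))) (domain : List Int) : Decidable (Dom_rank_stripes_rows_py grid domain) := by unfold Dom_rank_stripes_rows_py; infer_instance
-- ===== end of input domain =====

-- B derives the start of the progression from the grid's fixed cells and verifies it (falling
-- back to a domain scan only when the grid has no fixed cell) instead of trying every domain
-- value; measurably faster on large domains, return value unchanged on Pre_.

-- ===== PORT A =====
def rank_stripes_rows_py (grid : List (List (Option Int))) (domain : List Int) : Bool :=
  -- for start in domain: for direction in (1,-1): …  (early return True ≡ any)
  domain.any fun start =>
    ([1, -1] : List Int).any fun direction =>
      let row_vals : List Int := (List.range 3).map (fun i => start + direction * (i : Int))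
      if row_vals.any (fun v => !(domain.contains v)) then false
      else
        -- ok-flag loop with breaks ≡ all cells pass
        (List.range 3).all fun y =>
          match PySem.List.pyGet? grid (y : Int) with
          | none => false          -- Python IndexError (excluded by Pre_)
          | some row =>
            (List.range 3).all fun x =>
              match PySem.List.pyGet? row (x : Int) with
              | none => false      -- Python IndexError (excluded by Pre_)
              | some none => true
              | some (some fixed) => fixed == row_vals.getD y 0  -- row_vals[y], y < 3 = len row_vals

-- ===== PORT B =====
-- f-accumulator loop of Source B over one row's first three cells: none = early `return False` (conflict)
def pvRowFixed (f : Option Int) : List (Option Int) → Option (Option Int)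
  | [] => some f
  | none :: rest => pvRowFixed f rest
  | some c :: rest =>
    match f with
    | none => pvRowFixed (some c) rest
    | some v => if c == v then pvRowFixed (some v) rest else none

-- the `for y, row in enumerate(grid[:3])` loop building `fixed`; none = early `return False`
def pvCollectFixed (y : Int) : List (List (Option Int)) → Option (List (Int × Int))
  | [] => some []
  | row :: rest =>
    match pvRowFixed none (row.take 3) with   -- row[:3]
    | none => none
    | some none => pvCollectFixed (y + 1) rest
    | some (some f) => (pvCollectFixed (y + 1) rest).map (fun l => (y, f) :: l)

def rank_stripes_rows_py_alt (grid : List (List (Option Int))) (domain : List Int) : Bool :=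
  match pvCollectFixed 0 (grid.take 3) with   -- grid[:3]
  | none => false
  | some [] =>
    domain.any fun v => ([1, -1] : List Int).any fun d =>
      (List.range 3).all fun i => domain.contains (v + d * (i : Int))
  | some ((y0, v0) :: rest) =>
    ([1, -1] : List Int).any fun d =>
      let s := v0 - d * y0
      (((y0, v0) :: rest).all fun p => p.2 == s + d * p.1) &&
        ((List.range 3).all fun i => domain.contains (s + d * (i : Int)))

-- ===== PRECONDITION & SPEC =====
-- Pre_ excludes grids without a full 3x3 block whenever the domain contains a 3-term
-- progression: there A may hit IndexError (it also excludes some such malformed grids on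
-- which A still returns False before reaching a missing cell; B returns False there too).
def Pre_rank_stripes_rows_py (grid : List (List (Option Int))) (domain : List Int) : Prop :=
  (3 ≤ grid.length ∧ ∀ row ∈ grid.take 3, 3 ≤ row.length) ∨
  (∀ s ∈ domain, ∀ d ∈ ([1, -1] : List Int), s + d ∉ domain ∨ s + 2 * d ∉ domain)
instance (grid : List (List (Option Int))) (domain : List Int) : Decidable (Pre_rank_stripes_rows_py grid domain) := by unfold Pre_rank_stripes_rows_py; infer_instance

def pvWitness_rank_stripes_rows_py : List (List (Option Int)) × List Int :=
  ([[none, none, none], [none, none, none], [none, none, none]], [0])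

def Spec_rank_stripes_rows_py (grid : List (List (Option Int))) (domain : List Int) (out : Bool) : Prop := out = rank_stripes_rows_py_alt grid domain
instance (grid : List (List (Option Int))) (domain : List Int) (out : Bool) : Decidable (Spec_rank_stripes_rows_py grid domain out) := by unfold Spec_rank_stripes_rows_py; infer_instance

-- ===== CLAIM (what is proved, stated in full; the proofs are below) =====
def Claim_equal_rank_stripes_rows_py : Prop := ∀ (grid : List (List (Option Int))) (domain : List Int), Dom_rank_stripes_rows_py grid domain → Pre_rank_stripes_rows_py grid domain → Spec_rank_stripes_rows_py grid domain (rank_stripes_rows_py grid domain)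

-- ===== LEMMAS AND PROOFS =====

-- result of Source B's per-row scan, matched against an expected value
def pvFixMatch (r : Option (Option Int)) (e : Int) : Bool :=
  match r with
  | none => false
  | some none => true
  | some (some f) => f == e

-- the canonical "3-term progression from s with step d lies in domain" test
def pvT (domain : List Int) (s d : Int) : Bool :=
  (List.range 3).all fun i => domain.contains (s + d * (i : Int))

lemma pvRowFixed_spec (row : List (Option Int)) : ∀ (acc : Option Int) (e : Int),
    (acc.all (· == e) && row.all (fun c => c.all (· == e)))
      = pvFixMatch (pvRowFixed acc row) e := by
  induction row with
  | nil => intro acc e; cases acc <;> simp [pvRowFixed, pvFixMatch]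
  | cons c rest ih =>
    intro acc e
    cases c with
    | none => simpa [pvRowFixed] using ih acc e
    | some v =>
      cases acc with
      | none => simpa [pvRowFixed] using ih (some v) e
      | some w =>
        by_cases hvw : v = w
        · subst hvw
          have h2 := ih (some v) e
          simp only [pvRowFixed, BEq.rfl, if_true]
          rw [← h2]
          simp [Option.all]
        · have hb : (v == w) = false := by simp [hvw]
          simp only [pvRowFixed, hb, pvFixMatch]
          simp [Option.all]
          intro hw hv
          exact ((hvw (hv.trans hw.symm)).elim)

lemma pvGuard (domain : List Int) (s d : Int) (X : Bool) :
    (if (((List.range 3).map fun i => s + d * (i : Int)).any fun v => !(domain.contains v)) then false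
     else X)
      = (X && pvT domain s d) := by
  have h3 : List.range 3 = [0,1,2] := by decide
  simp only [pvT, h3, List.all]
  push_cast
  simp only [mul_zero, add_zero, mul_one]
  by_cases h0 : s ∈ domain <;> by_cases h1 : s + d ∈ domain <;>
    by_cases h2 : s + d * 2 ∈ domain <;> simp [h0, h1, h2] <;> cases X <;> simp

lemma pvRow3_flat (r : List (Option Int)) (h : 3 ≤ r.length) (e : Int) :
    ((match r[0]? with
      | none => false
      | some none => true
      | some (some f) => f == e) &&
     ((match r[1]? with
       | none => false
       | some none => true
       | some (some f) => f == e) &&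
      (match r[2]? with
       | none => false
       | some none => true
       | some (some f) => f == e)))
      = pvFixMatch (pvRowFixed none (r.take 3)) e := by
  rcases r with _ | ⟨c0, _ | ⟨c1, _ | ⟨c2, rr⟩⟩⟩ <;> simp at h
  rw [← pvRowFixed_spec]
  simp only [Option.all, List.take, List.all_cons, List.all_nil, Bool.true_and, Bool.and_true]
  rcases c0 with _|v0 <;> rcases c1 with _|v1 <;> rcases c2 with _|v2 <;> simp

lemma pvIdx0 {α : Type} (r : List α) : PySem.List.pyGet? r (0:Int) = r[0]? :=
  PySem.List.pyGet?_zero r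
lemma pvIdx1 {α : Type} (r : List α) : PySem.List.pyGet? r (1:Int) = r[1]? := by
  have h : ((1:Nat):Int) = (1:Int) := by norm_num
  rw [← h, PySem.List.pyGet?_natCast]
lemma pvIdx2 {α : Type} (r : List α) : PySem.List.pyGet? r (2:Int) = r[2]? := by
  have h : ((2:Nat):Int) = (2:Int) := by norm_num
  rw [← h, PySem.List.pyGet?_natCast]

lemma pvA_eval (domain : List Int) (r0 r1 r2 : List (Option Int)) (t : List (List (Option Int)))
    (h0 : 3 ≤ r0.length) (h1 : 3 ≤ r1.length) (h2 : 3 ≤ r2.length) :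
    rank_stripes_rows_py (r0 :: r1 :: r2 :: t) domain
      = domain.any fun s => ([1, -1] : List Int).any fun d =>
          ((pvFixMatch (pvRowFixed none (r0.take 3)) s &&
            (pvFixMatch (pvRowFixed none (r1.take 3)) (s + d) &&
             pvFixMatch (pvRowFixed none (r2.take 3)) (s + d * 2))) &&
           pvT domain s d) := by
  unfold rank_stripes_rows_py
  refine List.any_congr rfl fun s => ?_
  refine List.any_congr rfl fun d => ?_
  rw [pvGuard]
  congr 1
  rw [← pvRow3_flat r0 h0 s, ← pvRow3_flat r1 h1 (s + d), ← pvRow3_flat r2 h2 (s + d * 2)]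
  have h3 : List.range 3 = [0,1,2] := by decide
  simp [h3, pvIdx0, pvIdx1, pvIdx2]
  ac_rfl

lemma pvTmem (domain : List Int) (s d : Int) (h : pvT domain s d = true) :
    s ∈ domain ∧ s + d ∈ domain ∧ s + d * 2 ∈ domain := by
  have h3 : List.range 3 = [0,1,2] := by decide
  simp [pvT, h3] at h
  simpa using h

lemma pvSolve2 (domain : List Int) (B1 B2 : Int → Bool) (s1 s2 : Int)
    (h1 : ∀ s, B1 s = true → s = s1) (h2 : ∀ s, B2 s = true → s = s2)
    (m1 : B1 s1 = true → s1 ∈ domain) (m2 : B2 s2 = true → s2 ∈ domain) :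
    (domain.any fun s => B1 s || B2 s) = (B1 s1 || B2 s2) := by
  rw [Bool.eq_iff_iff]
  simp only [List.any_eq_true, Bool.or_eq_true]
  constructor
  · rintro ⟨s, _hs, h | h⟩
    · exact Or.inl (h1 s h ▸ h)
    · exact Or.inr (h2 s h ▸ h)
  · rintro (h | h)
    · exact ⟨s1, m1 h, Or.inl h⟩
    · exact ⟨s2, m2 h, Or.inr h⟩

lemma pvT_false (domain : List Int)
    (noT : ∀ s ∈ domain, ∀ d ∈ ([1, -1] : List Int), s + d ∉ domain ∨ s + 2 * d ∉ domain)
    (s d : Int) (hd : d = 1 ∨ d = -1) : pvT domain s d = false := by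
  cases h : pvT domain s d
  · rfl
  · exfalso
    obtain ⟨m0, m1, m2⟩ := pvTmem domain s d h
    rcases noT s m0 d (by rcases hd with rfl | rfl <;> simp) with hc | hc
    · exact hc m1
    · refine hc ?_
      have he : s + 2 * d = s + d * 2 := by ring
      rw [he]; exact m2

-- ===== VERDICT (by name: the statement is the Claim_ definition above) =====
theorem rank_stripes_rows_py_spec : Claim_equal_rank_stripes_rows_py := by
  intro grid domain _hdom hpre
  unfold Spec_rank_stripes_rows_py
  by_cases hsh : 3 ≤ grid.length ∧ ∀ row ∈ grid.take 3, 3 ≤ row.length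
  · obtain ⟨hlen, hrows⟩ := hsh
    rcases grid with _ | ⟨r0, _ | ⟨r1, _ | ⟨r2, t⟩⟩⟩ <;> simp at hlen
    have h0 : 3 ≤ r0.length := hrows r0 (by simp)
    have h1 : 3 ≤ r1.length := hrows r1 (by simp)
    have h2 : 3 ≤ r2.length := hrows r2 (by simp)
    rw [pvA_eval domain r0 r1 r2 t h0 h1 h2]
    have h3 : List.range 3 = [0,1,2] := by decide
    rcases hf0 : pvRowFixed none (r0.take 3) with _ | (_ | w0) <;>
      rcases hf1 : pvRowFixed none (r1.take 3) with _ | (_ | w1) <;>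
      rcases hf2 : pvRowFixed none (r2.take 3) with _ | (_ | w2) <;>
      simp only [pvFixMatch, rank_stripes_rows_py_alt, List.take_succ_cons, List.take_nil,
        pvCollectFixed, hf0, hf1, hf2, Bool.false_and, Bool.and_false, Bool.true_and,
        Bool.and_true, Option.map_some, Option.map_none] <;>
      try simp [pvT, h3, pvCollectFixed]
    -- row 2 only fixed (value w2)
    · refine (pvSolve2 domain
        (fun s => w2 == s + 2 && (decide (s ∈ domain) && (decide (s + 1 ∈ domain) && decide (s + 2 ∈ domain))))
        (fun s => w2 == s + -2 && (decide (s ∈ domain) && (decide (s + -1 ∈ domain) && decide (s + -2 ∈ domain))))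
        (w2 - 2) (w2 + 2)
        (fun s h => by simp at h; omega) (fun s h => by simp at h; omega)
        (fun h => by simp at h; tauto) (fun h => by simp at h; tauto)).trans ?_
      simp [show w2 - 2 + 2 = w2 from by ring, show w2 + 2 + -2 = w2 from by ring]
    -- row 1 only fixed (value w1)
    · refine (pvSolve2 domain
        (fun s => w1 == s + 1 && (decide (s ∈ domain) && (decide (s + 1 ∈ domain) && decide (s + 2 ∈ domain))))
        (fun s => w1 == s + -1 && (decide (s ∈ domain) && (decide (s + -1 ∈ domain) && decide (s + -2 ∈ domain))))
        (w1 - 1) (w1 + 1)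
        (fun s h => by simp at h; omega) (fun s h => by simp at h; omega)
        (fun h => by simp at h; tauto) (fun h => by simp at h; tauto)).trans ?_
      simp [show w1 - 1 + 1 = w1 from by ring, show w1 + 1 + -1 = w1 from by ring]
    -- rows 1 and 2 fixed
    · refine (pvSolve2 domain
        (fun s => w1 == s + 1 && w2 == s + 2 && (decide (s ∈ domain) && (decide (s + 1 ∈ domain) && decide (s + 2 ∈ domain))))
        (fun s => w1 == s + -1 && w2 == s + -2 && (decide (s ∈ domain) && (decide (s + -1 ∈ domain) && decide (s + -2 ∈ domain))))
        (w1 - 1) (w1 + 1)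
        (fun s h => by simp at h; omega) (fun s h => by simp at h; omega)
        (fun h => by simp at h; tauto) (fun h => by simp at h; tauto)).trans ?_
      simp [show w1 - 1 + 1 = w1 from by ring, show w1 + 1 + -1 = w1 from by ring]
    -- row 0 only fixed
    · refine (pvSolve2 domain
        (fun s => w0 == s && (decide (s ∈ domain) && (decide (s + 1 ∈ domain) && decide (s + 2 ∈ domain))))
        (fun s => w0 == s && (decide (s ∈ domain) && (decide (s + -1 ∈ domain) && decide (s + -2 ∈ domain))))
        w0 w0
        (fun s h => by simp at h; omega) (fun s h => by simp at h; omega)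
        (fun h => by simp at h; tauto) (fun h => by simp at h; tauto)).trans ?_
      simp
    -- rows 0 and 2 fixed
    · refine (pvSolve2 domain
        (fun s => w0 == s && w2 == s + 2 && (decide (s ∈ domain) && (decide (s + 1 ∈ domain) && decide (s + 2 ∈ domain))))
        (fun s => w0 == s && w2 == s + -2 && (decide (s ∈ domain) && (decide (s + -1 ∈ domain) && decide (s + -2 ∈ domain))))
        w0 w0
        (fun s h => by simp at h; omega) (fun s h => by simp at h; omega)
        (fun h => by simp at h; tauto) (fun h => by simp at h; tauto)).trans ?_
      simp
    -- rows 0 and 1 fixed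
    · refine (pvSolve2 domain
        (fun s => w0 == s && w1 == s + 1 && (decide (s ∈ domain) && (decide (s + 1 ∈ domain) && decide (s + 2 ∈ domain))))
        (fun s => w0 == s && w1 == s + -1 && (decide (s ∈ domain) && (decide (s + -1 ∈ domain) && decide (s + -2 ∈ domain))))
        w0 w0
        (fun s h => by simp at h; omega) (fun s h => by simp at h; omega)
        (fun h => by simp at h; tauto) (fun h => by simp at h; tauto)).trans ?_
      simp
    -- all rows fixed
    · refine (pvSolve2 domain
        (fun s => w0 == s && (w1 == s + 1 && w2 == s + 2) && (decide (s ∈ domain) && (decide (s + 1 ∈ domain) && decide (s + 2 ∈ domain))))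
        (fun s => w0 == s && (w1 == s + -1 && w2 == s + -2) && (decide (s ∈ domain) && (decide (s + -1 ∈ domain) && decide (s + -2 ∈ domain))))
        w0 w0
        (fun s h => by simp at h; omega) (fun s h => by simp at h; omega)
        (fun h => by simp at h; tauto) (fun h => by simp at h; tauto)).trans ?_
      simp
  · -- no full 3x3 block: Pre_ guarantees the domain has no 3-term progression; both sides are false
    rcases hpre with hsh' | hnoT
    · exact absurd hsh' hsh
    have hfold : ∀ (v d : Int),
        ((List.range 3).all fun i => domain.contains (v + d * (i : Int))) = pvT domain v d :=
      fun _ _ => rfl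
    have hA0 : rank_stripes_rows_py grid domain = false := by
      unfold rank_stripes_rows_py
      refine List.any_eq_false.mpr ?_
      intro s hs
      simp only [List.any_cons, List.any_nil, Bool.or_false]
      rw [pvGuard, pvGuard, pvT_false domain hnoT s 1 (Or.inl rfl),
        pvT_false domain hnoT s (-1) (Or.inr rfl)]
      simp
    have hB0 : rank_stripes_rows_py_alt grid domain = false := by
      unfold rank_stripes_rows_py_alt
      rcases hcf : pvCollectFixed 0 (grid.take 3) with _ | ⟨_ | ⟨⟨y0, v0⟩, rest⟩⟩
      · rfl
      · simp only []
        refine List.any_eq_false.mpr ?_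
        intro v hv
        simp only [List.any_cons, List.any_nil, Bool.or_false]
        rw [hfold, hfold, pvT_false domain hnoT v 1 (Or.inl rfl),
          pvT_false domain hnoT v (-1) (Or.inr rfl)]
        simp
      · simp only [List.any_cons, List.any_nil, Bool.or_false]
        rw [hfold, hfold, pvT_false domain hnoT (v0 - 1 * y0) 1 (Or.inl rfl),
          pvT_false domain hnoT (v0 - (-1) * y0) (-1) (Or.inr rfl)]
        simp
    rw [hA0, hB0]
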